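-- pv_equiv track=rewrite | github.com/nitsas/codejamsolutions | Welcome to Code Jam/runme.py | find_suffix_matches_after_position
-- ===== SOURCE A (Python) =====
-- def find_suffix_matches_after_position(suffix, string, rest_pattern_matches_after_position):
--     matches_after_position = [0 for p in range(len(string))]
--     for pos in rfindall(suffix[0], string):
--         if pos + 1 < len(rest_pattern_matches_after_position):
--             matches_after_pos = rest_pattern_matches_after_position[pos + 1]
--             for i in range(pos + 1):
--                 matches_after_position[i] += matches_after_pos
--     return matches_after_position
--
-- def rfindall(substring, string):
--     pos = string.rfind(substring)
--     while pos != -1: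
--         yield pos
--         pos = string.rfind(substring, 0, pos)
-- ===== SOURCE B (Python) =====
-- def find_suffix_matches_after_position(suffix, string, rest_pattern_matches_after_position):
--     # O(n) right-to-left sweep: accumulate each match's contribution into a
--     # running suffix total instead of re-adding it to every earlier position.
--     c = suffix[0]
--     m = len(rest_pattern_matches_after_position)
--     n = len(string)
--     out = [0] * n
--     total = 0
--     for i in range(n - 1, -1, -1):
--         if string[i] == c and i + 1 < m:
--             total += rest_pattern_matches_after_position[i + 1]
--         out[i] = total
--     return out
-- ===== Notes on version B (the rewrite author's own statement) =====
-- stated objective: faster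
-- what changed: Replaces A's rfind-generator over occurrences with a quadratic inner loop (adding each match's rest-contribution to every position before it) by a single O(n) right-to-left sweep that keeps a running suffix total.
import Mathlib
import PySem

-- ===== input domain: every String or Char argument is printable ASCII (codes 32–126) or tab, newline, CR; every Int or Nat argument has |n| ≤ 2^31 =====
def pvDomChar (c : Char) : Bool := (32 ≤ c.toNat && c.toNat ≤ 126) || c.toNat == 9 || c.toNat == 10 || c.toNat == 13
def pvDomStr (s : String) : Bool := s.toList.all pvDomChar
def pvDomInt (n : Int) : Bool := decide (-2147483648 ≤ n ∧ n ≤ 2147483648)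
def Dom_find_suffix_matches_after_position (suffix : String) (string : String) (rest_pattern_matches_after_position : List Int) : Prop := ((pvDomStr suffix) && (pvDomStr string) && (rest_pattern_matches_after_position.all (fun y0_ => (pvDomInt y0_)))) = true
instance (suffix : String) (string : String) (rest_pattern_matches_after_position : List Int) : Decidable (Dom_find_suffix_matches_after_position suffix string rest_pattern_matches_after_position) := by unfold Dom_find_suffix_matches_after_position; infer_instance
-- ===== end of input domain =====

-- B replaces A's per-occurrence inner loop (add a match's contribution to every
-- earlier position) by a single right-to-left sweep with a running suffix total.
-- Equivalence of the return values is proved for every nonempty suffix.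

-- ===== PORT A =====
-- string.rfind(c, 0, hi) for a ONE-CHARACTER needle c (all A ever searches for):
-- the highest index p < hi with string[p] = c, ported by hand step for step
-- (exact for a single character; agrees with Python's rfind on this case).
def pvRfind1 (c : Char) (chars : List Char) (hi : Nat) : Option Nat :=
  match hi with
  | 0 => none
  | h + 1 => if chars.getD h ' ' = c then some h else pvRfind1 c chars h

-- needed by pvRfindall's termination proof
theorem pvRfind1_lt {c : Char} {chars : List Char} {hi p : Nat}
    (h : pvRfind1 c chars hi = some p) : p < hi := by
  induction hi with
  | zero => simp [pvRfind1] at h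
  | succ h' ih =>
    rw [pvRfind1] at h
    split at h
    · injection h with h9; omega
    · exact Nat.lt_succ_of_lt (ih h)

-- the generator rfindall(c, string): occurrences of c right-to-left
def pvRfindall (c : Char) (chars : List Char) (hi : Nat) : List Nat :=
  match h : pvRfind1 c chars hi with
  | none => []
  | some p => p :: pvRfindall c chars p
termination_by hi
decreasing_by exact pvRfind1_lt h

def find_suffix_matches_after_position (suffix : String) (string : String) (rest_pattern_matches_after_position : List Int) : List Int :=
  match PySem.Str.pyGet? suffix 0 with
  | none => []  -- suffix[0] raises IndexError on empty suffix; excluded by Pre_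
  | some c =>
    let chars := string.toList
    let init : List Int := (List.range chars.length).map (fun _ => 0)
    (pvRfindall c chars chars.length).foldl
      (fun acc pos =>
        -- matches_after_pos = rest[pos+1], added at indices 0 .. pos
        if pos + 1 < rest_pattern_matches_after_position.length then
          (List.range (pos + 1)).foldl
            (fun a i => a.set i (a.getD i 0 + rest_pattern_matches_after_position.getD (pos + 1) 0)) acc
        else acc)
      init

-- ===== PORT B =====
-- the downward loop 'for i in range(n-1, -1, -1)' with its running total, as
-- structural recursion: the tail (the larger indices) is processed first.
def pvSweep (c : Char) (rest : List Int) (i : Nat) (tail : List Char) : Int × List Int :=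
  match tail with
  | [] => (0, [])
  | ch :: tl =>
    let r := pvSweep c rest (i + 1) tl
    let total := if ch = c ∧ i + 1 < rest.length then r.1 + rest.getD (i + 1) 0 else r.1
    (total, total :: r.2)

def find_suffix_matches_after_position_alt (suffix : String) (string : String) (rest_pattern_matches_after_position : List Int) : List Int :=
  match PySem.Str.pyGet? suffix 0 with
  | none => []  -- suffix[0] raises IndexError on empty suffix; excluded by Pre_
  | some c => (pvSweep c rest_pattern_matches_after_position 0 string.toList).2

-- ===== PRECONDITION & SPEC =====
-- Pre_ excludes only the empty suffix, on which Python's suffix[0] raises IndexError.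
def Pre_find_suffix_matches_after_position (suffix : String) (string : String) (rest_pattern_matches_after_position : List Int) : Prop := suffix ≠ ""
instance (suffix : String) (string : String) (rest_pattern_matches_after_position : List Int) : Decidable (Pre_find_suffix_matches_after_position suffix string rest_pattern_matches_after_position) := by unfold Pre_find_suffix_matches_after_position; infer_instance
def pvWitness_find_suffix_matches_after_position : String × String × List Int := ("ab", "cab", [1, 2, 3])

def Spec_find_suffix_matches_after_position (suffix : String) (string : String) (rest_pattern_matches_after_position : List Int) (out : List Int) : Prop := out = find_suffix_matches_after_position_alt suffix string rest_pattern_matches_after_position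
instance (suffix : String) (string : String) (rest_pattern_matches_after_position : List Int) (out : List Int) : Decidable (Spec_find_suffix_matches_after_position suffix string rest_pattern_matches_after_position out) := by unfold Spec_find_suffix_matches_after_position; infer_instance

-- ===== CLAIM (what is proved, stated in full; the proofs are below) =====
def Claim_equal_find_suffix_matches_after_position : Prop := ∀ (suffix : String) (string : String) (rest_pattern_matches_after_position : List Int), Dom_find_suffix_matches_after_position suffix string rest_pattern_matches_after_position → Pre_find_suffix_matches_after_position suffix string rest_pattern_matches_after_position → Spec_find_suffix_matches_after_position suffix string rest_pattern_matches_after_position (find_suffix_matches_after_position suffix string rest_pattern_matches_after_position)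

-- ===== LEMMAS AND PROOFS =====

-- contribution of position p, and the suffix total from position k on
def pvG (c : Char) (chars : List Char) (rest : List Int) (p : Nat) : Int :=
  if chars[p]? = some c ∧ p + 1 < rest.length then rest.getD (p + 1) 0 else 0

def pvT (c : Char) (chars : List Char) (rest : List Int) (k : Nat) : Int :=
  ∑ p ∈ Finset.range chars.length, if k ≤ p then pvG c chars rest p else 0

theorem pvT_ge {c : Char} {chars : List Char} {rest : List Int} {k : Nat}
    (h : chars.length ≤ k) : pvT c chars rest k = 0 := by
  apply Finset.sum_eq_zero
  intro p hp
  rw [Finset.mem_range] at hp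
  rw [if_neg (by omega)]

theorem pvT_succ {c : Char} {chars : List Char} {rest : List Int} {k : Nat}
    (h : k < chars.length) :
    pvT c chars rest k = pvG c chars rest k + pvT c chars rest (k + 1) := by
  unfold pvT
  have : ∀ p ∈ Finset.range chars.length,
      (if k ≤ p then pvG c chars rest p else 0)
      = (if p = k then pvG c chars rest p else 0)
        + (if k + 1 ≤ p then pvG c chars rest p else 0) := by
    intro p _
    by_cases hpk : p = k
    · subst hpk; simp
    · by_cases hk : k ≤ p
      · rw [if_pos hk, if_neg hpk, if_pos (by omega)]; ring
      · rw [if_neg hk, if_neg hpk, if_neg (by omega)]; ring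
  rw [Finset.sum_congr rfl this, Finset.sum_add_distrib,
    Finset.sum_ite_eq' (Finset.range chars.length) k, if_pos (Finset.mem_range.mpr h)]

-- B's sweep produces exactly the suffix totals
theorem pvSweep_eq (c : Char) (chars : List Char) (rest : List Int) :
    ∀ (tail : List Char) (i : Nat),
      (∀ j, tail[j]? = chars[i + j]?) → i + tail.length = chars.length →
      pvSweep c rest i tail
        = (pvT c chars rest i, (List.range' i tail.length).map (pvT c chars rest)) := by
  intro tail
  induction tail with
  | nil =>
    intro i _ hlen
    simp only [List.length_nil, Nat.add_zero] at hlen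
    simp [pvSweep, pvT_ge (le_of_eq hlen.symm)]
  | cons ch tl ih =>
    intro i hget hlen
    have h0 : chars[i]? = some ch := by
      have := hget 0; simpa using this.symm
    have hget' : ∀ j, tl[j]? = chars[(i + 1) + j]? := by
      intro j
      have := hget (j + 1)
      simpa [Nat.add_assoc, Nat.add_comm 1 j] using this
    have hlen' : (i + 1) + tl.length = chars.length := by
      simp only [List.length_cons] at hlen; omega
    have hlt : i < chars.length := by omega
    rw [pvSweep, ih (i + 1) hget' hlen']
    have hG : pvG c chars rest i
        = if ch = c ∧ i + 1 < rest.length then rest.getD (i + 1) 0 else 0 := by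
      unfold pvG
      rw [h0]
      by_cases hc : ch = c
      · subst hc; simp
      · rw [if_neg (by simp [hc]), if_neg (by simp [hc])]
    have ht' : (if ch = c ∧ i + 1 < rest.length then
        pvT c chars rest (i + 1) + rest.getD (i + 1) 0 else pvT c chars rest (i + 1))
        = pvT c chars rest i := by
      rw [pvT_succ hlt, hG]; split_ifs with hcond
      · ring
      · ring
    simp only [List.length_cons, List.range'_succ, List.map_cons, ht']

-- getD after set, with the index in range
theorem pvGetD_set (l : List Int) (i k : Nat) (v d : Int) (h : i < l.length) :
    (l.set i v).getD k d = if k = i then v else l.getD k d := by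
  by_cases hk : k = i
  · subst hk
    rw [if_pos rfl, List.getD, List.getElem?_set_self h, Option.getD_some]
  · rw [if_neg hk, List.getD, List.getElem?_set_ne (by omega), List.getD]

-- A's inner loop: length and pointwise value
theorem pvSetFold_length (m : Int) :
    ∀ (l : List Nat) (acc : List Int),
      (l.foldl (fun a i => a.set i (a.getD i 0 + m)) acc).length = acc.length := by
  intro l
  induction l with
  | nil => intro acc; rfl
  | cons x xs ih => intro acc; rw [List.foldl_cons, ih]; simp

theorem pvInner_getD (m : Int) :
    ∀ (t : Nat) (acc : List Int), t ≤ acc.length → ∀ k,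
      ((List.range t).foldl (fun a i => a.set i (a.getD i 0 + m)) acc).getD k 0
        = if k < t then acc.getD k 0 + m else acc.getD k 0 := by
  intro t
  induction t with
  | zero => intro acc _ k; simp
  | succ t ih =>
    intro acc ht k
    rw [List.range_succ, List.foldl_append, List.foldl_cons, List.foldl_nil]
    set prev := (List.range t).foldl (fun a i => a.set i (a.getD i 0 + m)) acc with hprev
    have hlen : prev.length = acc.length := pvSetFold_length m _ acc
    have iht := ih acc (by omega)
    rw [pvGetD_set prev t k _ 0 (by omega)]
    by_cases hk : k = t
    · subst hk
      rw [if_pos rfl, iht k, if_neg (by omega), if_pos (by omega)]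
    · rw [if_neg hk, iht k]
      rcases Nat.lt_or_ge k t with h1 | h1
      · rw [if_pos h1, if_pos (by omega)]
      · rw [if_neg (by omega), if_neg (by omega)]

-- A's outer fold over any list of positions: length and pointwise value
theorem pvFoldA_length (rest : List Int) :
    ∀ (P : List Nat) (acc : List Int),
      (P.foldl
        (fun acc pos =>
          if pos + 1 < rest.length then
            (List.range (pos + 1)).foldl
              (fun a i => a.set i (a.getD i 0 + rest.getD (pos + 1) 0)) acc
          else acc) acc).length = acc.length := by
  intro P
  induction P with
  | nil => intro acc; rfl
  | cons p ps ih =>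
    intro acc
    rw [List.foldl_cons, ih]
    split_ifs with h
    · exact pvSetFold_length _ _ acc
    · rfl

theorem pvFoldA_getD (rest : List Int) :
    ∀ (P : List Nat) (acc : List Int), (∀ p ∈ P, p < acc.length) → ∀ k, k < acc.length →
      (P.foldl
        (fun acc pos =>
          if pos + 1 < rest.length then
            (List.range (pos + 1)).foldl
              (fun a i => a.set i (a.getD i 0 + rest.getD (pos + 1) 0)) acc
          else acc) acc).getD k 0
        = acc.getD k 0
          + (P.map (fun p => if k ≤ p ∧ p + 1 < rest.length then rest.getD (p + 1) 0 else 0)).sum := by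
  intro P
  induction P with
  | nil => intro acc _ k _; simp
  | cons p ps ih =>
    intro acc hmem k hk
    rw [List.foldl_cons, List.map_cons, List.sum_cons]
    have hp : p < acc.length := hmem p (by simp)
    by_cases hm : p + 1 < rest.length
    · rw [if_pos hm]
      have hlen : ((List.range (p + 1)).foldl
          (fun a i => a.set i (a.getD i 0 + rest.getD (p + 1) 0)) acc).length = acc.length :=
        pvSetFold_length _ _ acc
      rw [ih _ (by intro q hq; rw [hlen]; exact hmem q (by simp [hq])) k (by omega)]
      rw [pvInner_getD _ (p + 1) acc (by omega) k]
      by_cases hkp : k ≤ p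
      · rw [if_pos (by omega), if_pos ⟨hkp, hm⟩]; ring
      · rw [if_neg (by omega), if_neg (by simp [hkp])]; ring
    · rw [if_neg hm, ih _ (by intro q hq; exact hmem q (by simp [hq])) k hk,
        if_neg (by simp [hm])]
      ring

-- characterization of pvRfind1 / pvRfindall
theorem pvRfind1_none {c : Char} {chars : List Char} :
    ∀ {hi : Nat}, pvRfind1 c chars hi = none → ∀ q < hi, chars.getD q ' ' ≠ c := by
  intro hi
  induction hi with
  | zero => intro _ q hq; omega
  | succ h ih =>
    intro hnone q hq
    rw [pvRfind1] at hnone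
    split at hnone
    · exact absurd hnone (by simp)
    · rcases Nat.lt_succ_iff_lt_or_eq.mp hq with h1 | h1
      · exact ih hnone q h1
      · subst h1; assumption

theorem pvRfind1_some {c : Char} {chars : List Char} :
    ∀ {hi p : Nat}, pvRfind1 c chars hi = some p →
      p < hi ∧ chars.getD p ' ' = c ∧ ∀ q, p < q → q < hi → chars.getD q ' ' ≠ c := by
  intro hi
  induction hi with
  | zero => intro p h; simp [pvRfind1] at h
  | succ h ih =>
    intro p hsome
    rw [pvRfind1] at hsome
    split at hsome
    · rename_i heq
      obtain rfl : h = p := by simpa using hsome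
      exact ⟨by omega, heq, by intro q hq1 hq2; omega⟩
    · rename_i hne
      obtain ⟨h1, h2, h3⟩ := ih hsome
      refine ⟨by omega, h2, ?_⟩
      intro q hq1 hq2
      rcases Nat.lt_succ_iff_lt_or_eq.mp hq2 with h4 | h4
      · exact h3 q hq1 h4
      · subst h4; exact hne

theorem pvRfindall_eq (c : Char) (chars : List Char) :
    ∀ hi : Nat, pvRfindall c chars hi
      = ((List.range hi).filter (fun p => chars.getD p ' ' == c)).reverse := by
  intro hi
  induction hi using Nat.strong_induction_on with
  | _ hi ih =>
    rw [pvRfindall]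
    split
    · rename_i hnone
      have hno := pvRfind1_none hnone
      rw [List.filter_eq_nil_iff.mpr ?_, List.reverse_nil]
      intro q hq hb
      exact hno q (List.mem_range.mp hq) (beq_iff_eq.mp hb)
    · rename_i p hsome
      obtain ⟨h1, h2, h3⟩ := pvRfind1_some hsome
      rw [ih p h1]
      have hsplit : (List.range hi).filter (fun p => chars.getD p ' ' == c)
          = ((List.range p).filter (fun p => chars.getD p ' ' == c)) ++ [p] := by
        have hdecomp : hi = (p + 1) + (hi - (p + 1)) := by omega
        rw [hdecomp, List.range_add, List.filter_append, List.range_succ,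
          List.filter_append]
        have hb : (chars.getD p ' ' == c) = true := beq_iff_eq.mpr h2
        have hmid : [p].filter (fun p => chars.getD p ' ' == c) = [p] := by
          simp only [List.filter_singleton, hb, cond_true]
        have htop : ((List.range (hi - (p + 1))).map (fun i => (p + 1) + i)).filter
            (fun p => chars.getD p ' ' == c) = [] := by
          apply List.filter_eq_nil_iff.mpr
          intro q hq hbq
          simp only [List.mem_map, List.mem_range] at hq
          obtain ⟨j, hj, rfl⟩ := hq
          exact h3 ((p + 1) + j) (by omega) (by omega) (beq_iff_eq.mp hbq)
        rw [hmid, htop, List.append_nil]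
      rw [hsplit, List.reverse_append]
      rfl

-- list-sum bookkeeping
theorem pvSum_filter_map (q : Nat → Bool) (f : Nat → Int) :
    ∀ l : List Nat, ((l.filter q).map f).sum
      = (l.map (fun p => if q p then f p else 0)).sum := by
  intro l
  induction l with
  | nil => rfl
  | cons x xs ih =>
    by_cases hx : q x
    · rw [List.filter_cons_of_pos hx, List.map_cons, List.sum_cons, ih,
        List.map_cons, List.sum_cons, if_pos hx]
    · rw [List.filter_cons_of_neg (by simpa using hx), ih, List.map_cons,
        List.sum_cons, if_neg (by simpa using hx)]
      ring

theorem pvSum_map_range (f : Nat → Int) :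
    ∀ n : Nat, ((List.range n).map f).sum = ∑ p ∈ Finset.range n, f p := by
  intro n
  induction n with
  | zero => rfl
  | succ n ih =>
    rw [List.range_succ, List.map_append, List.sum_append, ih,
      Finset.sum_range_succ]
    simp

-- A's result, pointwise, is the suffix total pvT
theorem pvA_getD (c : Char) (chars : List Char) (rest : List Int) (k : Nat)
    (hk : k < chars.length) :
    ((pvRfindall c chars chars.length).foldl
      (fun acc pos =>
        if pos + 1 < rest.length then
          (List.range (pos + 1)).foldl
            (fun a i => a.set i (a.getD i 0 + rest.getD (pos + 1) 0)) acc
        else acc)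
      ((List.range chars.length).map (fun _ => (0 : Int)))).getD k 0
      = pvT c chars rest k := by
  set init : List Int := (List.range chars.length).map (fun _ => (0 : Int)) with hinit
  have hinitlen : init.length = chars.length := by simp [hinit]
  have hmem : ∀ p ∈ pvRfindall c chars chars.length, p < init.length := by
    intro p hp
    rw [pvRfindall_eq] at hp
    simp only [List.mem_reverse, List.mem_filter, List.mem_range] at hp
    omega
  rw [pvFoldA_getD rest _ init hmem k (by omega)]
  have hinit0 : init.getD k 0 = 0 := by
    rw [hinit, List.getD, List.getElem?_map]
    simp [List.getElem?_range hk]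
  rw [hinit0, pvRfindall_eq, List.map_reverse, List.sum_reverse,
    pvSum_filter_map, pvSum_map_range, zero_add]
  unfold pvT
  apply Finset.sum_congr rfl
  intro p hp
  rw [Finset.mem_range] at hp
  have hpv : chars.getD p ' ' = chars[p] := by
    rw [List.getD, List.getElem?_eq_getElem hp, Option.getD_some]
  unfold pvG
  rw [hpv, List.getElem?_eq_getElem hp]
  by_cases hc : chars[p] = c <;> by_cases hkp : k ≤ p <;>
    by_cases hm : p + 1 < rest.length <;> simp [hc, hkp, hm]

-- ===== VERDICT (by name: the statement is the Claim_ definition above) =====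
theorem find_suffix_matches_after_position_spec : Claim_equal_find_suffix_matches_after_position := by
  intro suffix string rest_pattern_matches_after_position _ _
  unfold Spec_find_suffix_matches_after_position
  unfold find_suffix_matches_after_position find_suffix_matches_after_position_alt
  cases hc : PySem.Str.pyGet? suffix 0 with
  | none => rfl
  | some c =>
    simp only
    set chars := string.toList with hchars
    have hB : (pvSweep c rest_pattern_matches_after_position 0 chars).2
        = (List.range' 0 chars.length).map (pvT c chars rest_pattern_matches_after_position) := by
      rw [pvSweep_eq c chars rest_pattern_matches_after_position chars 0
        (by intro j; simp) (by simp)]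
    rw [hB]
    apply List.ext_getElem
    · rw [pvFoldA_length]
      simp
    · intro k h1 h2
      have hklt : k < chars.length := by simpa using h2
      have hA := pvA_getD c chars rest_pattern_matches_after_position k hklt
      rw [List.getD, List.getElem?_eq_getElem h1, Option.getD_some] at hA
      rw [hA, List.getElem_map, List.getElem_range']
      simp
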